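-- pv_equiv track=rewrite | github.com/labs1923/sem5 | CN/5.py | rgen
-- ===== SOURCE A (Python) =====
-- def rgen(n,cl):
--     numbers = []
--     for i in range(cl):
--       binary = bin(i).replace("0b", "")
--       while(len(binary)<n):
--         binary = str(0)+binary
--       numbers.append(list(binary)[::-1])
--     r = list()
--     for i in range(n):
--         rn = list()
--         for j in range(cl):
--             if numbers[j][i] == '1':
--                 rn.append(j)
--         r.append(rn)
--     return r
-- ===== SOURCE B (Python) =====
-- def rgen(n, cl):
--     r = [[] for _ in range(n)] if n > 0 else []
--     for j in range(cl):
--         t, i = j, 0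
--         while t and i < n:
--             if t & 1:
--                 r[i].append(j)
--             t >>= 1
--             i += 1
--     return r
-- ===== Notes on version B (the rewrite author's own statement) =====
-- stated objective: faster
-- what changed: Replaced the precomputed reversed-binary-string table plus per-bit gather scan with a single scatter pass: each j walks its own bits (stopping when they run out) and appends itself to the matching buckets.
import Mathlib
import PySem

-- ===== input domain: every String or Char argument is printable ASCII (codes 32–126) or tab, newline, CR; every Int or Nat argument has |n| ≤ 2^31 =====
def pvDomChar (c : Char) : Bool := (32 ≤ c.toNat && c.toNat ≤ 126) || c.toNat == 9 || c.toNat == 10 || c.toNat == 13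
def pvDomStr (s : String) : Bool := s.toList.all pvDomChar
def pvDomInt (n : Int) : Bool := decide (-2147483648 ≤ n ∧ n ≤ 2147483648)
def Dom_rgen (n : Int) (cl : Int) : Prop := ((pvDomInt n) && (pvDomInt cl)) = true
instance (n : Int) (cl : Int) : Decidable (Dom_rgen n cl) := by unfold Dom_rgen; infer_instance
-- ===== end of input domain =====

-- B replaces A's reversed-binary-string table and per-bit gather scan by one scatter pass over j
-- (each j walks its own bits and appends itself to the matching buckets); measurably faster.

-- ===== PORT A =====
-- bin(m) for m > 0 produces these digits MSB-first; pvBin adds Python's special case bin(0)="0b0".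
-- The '.replace("0b", "")' of A removes exactly the "0b" prefix (exact here: the remaining
-- characters are only '0'/'1', so "0b" cannot occur anywhere else).
def pvBinDigits : Nat → List Char
  | 0 => []
  | m+1 => pvBinDigits ((m+1)/2) ++ [if (m+1) % 2 = 1 then '1' else '0']

def pvBin (m : Nat) : List Char := if m = 0 then ['0'] else pvBinDigits m

-- the 'while len(binary) < n: binary = "0" + binary' loop
def pvPad (n : Int) (b : List Char) : List Char :=
  if (b.length : Int) < n then pvPad n ('0' :: b) else b
termination_by (n - b.length).toNat
decreasing_by simp; omega

def rgen (n : Int) (cl : Int) : List (List Int) :=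
  -- numbers.append(list(binary)[::-1]); i from range(cl) is nonneg, so i.toNat is exact
  let numbers : List (List Char) :=
    (PySem.List.pyRange 0 cl 1).foldl
      (fun numbers i => numbers ++ [(pvPad n (pvBin i.toNat)).reverse]) []
  -- numbers[j][i]: both indices are always in range (j < cl = len(numbers), i < n ≤ len(numbers[j])),
  -- so pyGetD with a dummy default is exact here
  (PySem.List.pyRange 0 n 1).foldl
    (fun r i =>
      let rn : List Int :=
        (PySem.List.pyRange 0 cl 1).foldl
          (fun rn j =>
            if PySem.List.pyGetD (PySem.List.pyGetD numbers j []) i ' ' = '1'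
            then rn ++ [j] else rn) []
      r ++ [rn]) []

-- ===== PORT B =====
-- the 'while t and i < n' inner loop of Source B: scatter j into the buckets of its set bits
def pvScat (j : Int) (n : Int) : Nat → Nat → List (List Int) → List (List Int)
  | t, i, r =>
    if h : t ≠ 0 ∧ (i : Int) < n then
      pvScat j n (t/2) (i+1)
        (if t % 2 = 1 then r.set i (r.getD i [] ++ [j]) else r)
    else r
termination_by t _ _ => t
decreasing_by exact Nat.div_lt_self (Nat.pos_of_ne_zero h.1) one_lt_two

def rgen_alt (n : Int) (cl : Int) : List (List Int) :=
  -- r = [[] for _ in range(n)] if n > 0 else []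
  let r : List (List Int) := List.replicate n.toNat []
  -- for j in range(cl): scatter; j from range(cl) is nonneg, so j.toNat is exact
  (PySem.List.pyRange 0 cl 1).foldl (fun r j => pvScat j n j.toNat 0 r) r

-- ===== PRECONDITION & SPEC =====
def Spec_rgen (n : Int) (cl : Int) (out : List (List Int)) : Prop := out = rgen_alt n cl
instance (n : Int) (cl : Int) (out : List (List Int)) : Decidable (Spec_rgen n cl out) := by unfold Spec_rgen; infer_instance

-- ===== CLAIM (what is proved, stated in full; the proofs are below) =====
def Claim_equal_rgen : Prop := ∀ (n : Int) (cl : Int), Dom_rgen n cl → Spec_rgen n cl (rgen n cl)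

-- ===== LEMMAS AND PROOFS =====

-- the common value both ports compute: bucket i lists the j < cl with bit i set, ascending
def pvTarget (n : Int) (cl : Int) : List (List Int) :=
  (List.range n.toNat).map (fun i =>
    ((List.range cl.toNat).filter (fun j => Nat.testBit j i)).map (fun j : Nat => (j : Int)))

lemma digits_lt (m : Nat) : m < 2 ^ (pvBinDigits m).length := by
  induction m using Nat.strong_induction_on with
  | _ m ih =>
    rcases m with _ | m
    · simp [pvBinDigits]
    · rw [pvBinDigits]
      have h := ih ((m+1)/2) (by omega)
      simp only [List.length_append, List.length_cons, List.length_nil, zero_add]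
      rw [pow_succ]
      omega

lemma digits_rev (m : Nat) (hm : m ≠ 0) :
    (pvBinDigits m).reverse =
      (List.range (pvBinDigits m).length).map (fun i => if m.testBit i then '1' else '0') := by
  induction m using Nat.strong_induction_on with
  | _ m ih =>
    rcases m with _ | m
    · exact absurd rfl hm
    · rw [pvBinDigits]
      by_cases h2 : (m+1)/2 = 0
      · have hm0 : m = 0 := by omega
        subst hm0
        simp [pvBinDigits, Nat.testBit_zero]
      · have ih' := ih ((m+1)/2) (by omega) h2
        rw [List.reverse_append, ih', List.length_append, List.length_cons, List.length_nil,
          zero_add, List.range_succ_eq_map]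
        simp [List.map_map, Nat.testBit_zero, Function.comp_def, Nat.testBit_succ]

lemma bin_rev (m : Nat) :
    (pvBin m).reverse =
      (List.range (pvBin m).length).map (fun i => if m.testBit i then '1' else '0') := by
  by_cases h : m = 0
  · subst h; simp [pvBin]
  · simp only [pvBin, if_neg h]
    exact digits_rev m h

lemma bin_lt (m : Nat) : m < 2 ^ (pvBin m).length := by
  by_cases h : m = 0
  · subst h; simp [pvBin]
  · simp only [pvBin, if_neg h]
    exact digits_lt m

lemma pad_eq (n : Int) (b : List Char) :
    pvPad n b = List.replicate ((n - b.length).toNat) '0' ++ b := by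
  generalize hK : ((n : Int) - (b.length : Int)).toNat = K
  induction K generalizing b with
  | zero =>
    rw [pvPad, if_neg (by omega)]
    simp
  | succ K ihK =>
    have hlt : ((b.length : Int)) < n := by omega
    rw [pvPad, if_pos hlt, ihK ('0' :: b) (by simp only [List.length_cons]; omega),
      List.replicate_succ', List.append_assoc]
    simp

lemma padded_getD (n : Int) (m i : Nat) (hi : (i : Int) < n ∨ i < (pvBin m).length) :
    ((pvPad n (pvBin m)).reverse).getD i ' ' = if m.testBit i then '1' else '0' := by
  rw [pad_eq, List.reverse_append, List.reverse_replicate]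
  by_cases h : i < (pvBin m).length
  · rw [List.getD_append _ _ _ _ (by simpa using h), bin_rev,
      List.getD_eq_getElem _ _ (by simpa using h)]
    simp
  · have hL : (pvBin m).length ≤ i := by omega
    have hbit : m.testBit i = false :=
      Nat.testBit_eq_false_of_lt
        (lt_of_lt_of_le (bin_lt m) (Nat.pow_le_pow_right (by norm_num) hL))
    have hi' : (i : Int) < n := hi.resolve_right (by omega)
    rw [List.getD_append_right _ _ _ _ (by simpa using hL), hbit, List.length_reverse]
    simp only [Bool.false_eq_true, if_false]
    apply List.getD_replicate
    omega

lemma rgen_eq (n cl : Int) : rgen n cl = pvTarget n cl := by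
  unfold rgen pvTarget
  simp only [PySem.List.pyRange_one, Int.sub_zero, zero_add, List.foldl_map, Int.toNat_natCast,
    PySem.List.foldl_append_singleton_eq_map, List.nil_append]
  apply List.map_congr_left
  intro i' hi'
  have hiN : i' < n.toNat := List.mem_range.mp hi'
  rw [PySem.List.foldl_append_ite (fun j : Nat =>
      PySem.List.pyGetD (PySem.List.pyGetD
        ((List.range cl.toNat).map fun k => (pvPad n (pvBin k)).reverse) (↑j) []) (↑i') ' ' = '1')
      (fun k : Nat => (k : Int))]
  rw [List.nil_append]
  refine congrArg (List.map _) (List.filter_congr ?_)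
  intro k hk
  have hkC : k < cl.toNat := List.mem_range.mp hk
  simp only [PySem.List.pyGetD_natCast]
  have hrow : (List.map (fun k => (pvPad n (pvBin k)).reverse) (List.range cl.toNat)).getD k []
      = (pvPad n (pvBin k)).reverse := by
    rw [List.getD_eq_getElem _ _ (by simpa using hkC)]
    simp
  simp only [hrow, padded_getD n k i' (Or.inl (by omega))]
  cases hb : Nat.testBit k i' <;> simp [hb]

lemma pvScat_length (j n : Int) (t i : Nat) (r : List (List Int)) :
    (pvScat j n t i r).length = r.length := by
  induction t using Nat.strong_induction_on generalizing i r with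
  | _ t ih =>
    rw [pvScat]
    split
    · next h =>
      rw [ih (t/2) (Nat.div_lt_self (Nat.pos_of_ne_zero h.1) one_lt_two)]
      split <;> simp
    · rfl

lemma pvScat_getD (j n : Int) (t i : Nat) (r : List (List Int)) (hr : n ≤ (r.length : Int))
    (m : Nat) :
    (pvScat j n t i r).getD m [] =
      if i ≤ m ∧ (m : Int) < n ∧ Nat.testBit t (m - i) then r.getD m [] ++ [j]
      else r.getD m [] := by
  induction t using Nat.strong_induction_on generalizing i r with
  | _ t ih =>
    rw [pvScat]
    split
    · next h =>
      obtain ⟨ht, hi⟩ := h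
      have hilen : i < r.length := by omega
      have hlen' : (if t % 2 = 1 then r.set i (r.getD i [] ++ [j]) else r).length = r.length := by
        split <;> simp
      rw [ih (t/2) (Nat.div_lt_self (Nat.pos_of_ne_zero ht) one_lt_two) (i+1) _
        (by rw [hlen']; exact hr)]
      have hget : (if t % 2 = 1 then r.set i (r.getD i [] ++ [j]) else r).getD m [] =
          if m = i ∧ t % 2 = 1 then r.getD m [] ++ [j] else r.getD m [] := by
        by_cases hm : m = i
        · subst hm
          split
          · next hp =>
            simp [hp, List.getD_eq_getElem?_getD, hilen]
          · next hp => simp [hp]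
        · split
          · next hp =>
            simp only [hm, hp, and_true, if_false]
            simp [List.getD_eq_getElem?_getD, Ne.symm hm]
          · simp [hm]
      rw [hget]
      rcases Nat.lt_trichotomy m i with hmi | hmi | hmi
      · have c1 : ¬(i+1 ≤ m) := by omega
        have c2 : ¬(i ≤ m) := by omega
        have c3 : ¬(m = i) := by omega
        simp [c1, c2, c3]
      · subst hmi
        have c1 : ¬(m+1 ≤ m) := by omega
        by_cases hp : t % 2 = 1 <;>
          simp [c1, hp, hi, Nat.testBit_zero]
      · have e1 : i ≤ m := by omega
        have e2 : i+1 ≤ m := by omega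
        have e3 : ¬(m = i) := by omega
        have e4 : m - i = (m - (i+1)) + 1 := by omega
        simp [e1, e2, e3, e4, Nat.testBit_succ]
    · next h =>
      have hneg : ¬(i ≤ m ∧ (m : Int) < n ∧ Nat.testBit t (m - i)) := by
        by_cases ht : t = 0
        · subst ht; simp [Nat.zero_testBit]
        · have hin : ¬((i : Int) < n) := fun hc => h ⟨ht, hc⟩
          rintro ⟨h1, h2, _⟩
          omega
      rw [if_neg hneg]

lemma rgen_alt_inv (n : Int) (C : Nat) :
    ((List.range C).foldl (fun r (k : Nat) => pvScat (k : Int) n k 0 r)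
        (List.replicate n.toNat ([] : List Int))).length = n.toNat ∧
    ∀ i : Nat,
      ((List.range C).foldl (fun r (k : Nat) => pvScat (k : Int) n k 0 r)
          (List.replicate n.toNat ([] : List Int))).getD i [] =
        if i < n.toNat then
          ((List.range C).filter (fun j => Nat.testBit j i)).map (fun j : Nat => (j : Int))
        else [] := by
  induction C with
  | zero =>
    refine ⟨by simp, fun i => ?_⟩
    simp only [List.getD_eq_getElem?_getD, List.getElem?_replicate, List.filter_nil,
      List.map_nil, List.range_zero, List.foldl_nil]
    by_cases h : i < n.toNat <;> simp [h]
  | succ C ih =>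
    obtain ⟨hlen, hget⟩ := ih
    rw [List.range_succ, List.foldl_append, List.foldl_cons, List.foldl_nil]
    refine ⟨by rw [pvScat_length, hlen], fun i => ?_⟩
    rw [pvScat_getD _ _ _ _ _ (by rw [hlen]; exact Int.self_le_toNat n) i, hget i]
    by_cases h1 : i < n.toNat
    · have h2 : (i : Int) < n := by omega
      simp only [h1, if_true, Nat.zero_le, true_and, h2, Nat.sub_zero, List.filter_append,
        List.filter_cons, List.filter_nil, List.map_append]
      cases hb : Nat.testBit C i <;> simp [hb]
    · have h2 : ¬((i : Int) < n) := by
        have := Int.self_le_toNat n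
        omega
      simp [h1, h2]

lemma rgen_alt_eq (n cl : Int) : rgen_alt n cl = pvTarget n cl := by
  unfold rgen_alt pvTarget
  simp only [PySem.List.pyRange_one, Int.sub_zero, zero_add, List.foldl_map, Int.toNat_natCast]
  obtain ⟨hlen, hget⟩ := rgen_alt_inv n cl.toNat
  apply List.ext_getElem
  · simp [hlen]
  · intro i h1 h2
    have hiN : i < n.toNat := by simpa using h2
    have hg := hget i
    rw [List.getD_eq_getElem _ _ h1] at hg
    rw [hg]
    simp [hiN]

-- ===== VERDICT (by name: the statement is the Claim_ definition above) =====
theorem rgen_spec : Claim_equal_rgen := by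
  intro n cl _
  unfold Spec_rgen
  rw [rgen_eq, rgen_alt_eq]
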